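-- pv_equiv track=rewrite | github.com/palisades-berlin/TheCollector | create_icons.py | draw_camera
-- ===== SOURCE A (Python) =====
-- def draw_camera(S):
--     px = [[(0, 0, 0, 0)] * S for _ in range(S)]
--
--     def set_px(x, y, c):
--         if 0 <= x < S and 0 <= y < S:
--             px[y][x] = c
--
--     def fill(x0, y0, x1, y1, c):
--         for y in range(max(0, y0), min(S, y1)):
--             for x in range(max(0, x0), min(S, x1)):
--                 set_px(x, y, c)
--
--     def circle(cx, cy, r, c):
--         ir = int(r)
--         for dy in range(-ir, ir + 1):
--             for dx in range(-ir, ir + 1):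
--                 if dx * dx + dy * dy <= r * r:
--                     set_px(int(cx) + dx, int(cy) + dy, c)
--
--     # ── Palette — same family as url-collector ────────────────────────────
--     DARK   = ( 13,  71, 161, 255)   # #0d47a1  dark blue (rail / lens core)
--     COVER  = ( 21, 101, 192, 255)   # #1565c0  blue body
--     WHITE  = (255, 255, 255, 255)   # white details
--     RING   = (173, 210, 240, 255)   # light blue inner ring (like ruled lines)
--     HILITE = (255, 255, 255, 180)   # soft highlight dot
--
--     # ── Layout (proportional to S) ────────────────────────────────────────
--     m   = max(1, round(S * 0.06))
--     rad = max(2, round(S * 0.12))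
--
--     bx0, by0 = m,     m
--     bx1, by1 = S - m, S - m
--
--     # ── 1. Camera body — COVER rounded rectangle ──────────────────────────
--     fill(bx0 + rad, by0,       bx1 - rad, by1,       COVER)
--     fill(bx0,       by0 + rad, bx1,       by1 - rad, COVER)
--     for (ccx, ccy) in [(bx0+rad, by0+rad), (bx1-rad, by0+rad),
--                        (bx0+rad, by1-rad), (bx1-rad, by1-rad)]:
--         circle(ccx, ccy, rad, COVER)
--
--     # ── 2. Top rail — darker strip, same rounded top corners ──────────────
--     # Mirrors how url-collector draws its spine, just rotated to the top.
--     rail_h = max(2, round(S * 0.20))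
--     fill(bx0 + rad, by0,       bx1 - rad, by0 + rail_h, DARK)   # top centre
--     fill(bx0,       by0 + rad, bx1,       by0 + rail_h, DARK)   # full-width below radius
--     circle(bx0 + rad, by0 + rad, rad, DARK)                      # top-left corner
--     circle(bx1 - rad, by0 + rad, rad, DARK)                      # top-right corner
--     fill(bx0 + rad,   by0,       bx1 - rad, by0 + rad,  DARK)   # solid top edge
--
--     # ── 3. Lens — multi-ring: white → cover blue → light ring → dark core ─
--     lens_cx = S // 2
--     lens_cy = by0 + rail_h + round((by1 - by0 - rail_h) * 0.52)
--
--     r_out  = max(3, round(S * 0.28))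
--     r_body = max(2, round(r_out * 0.76))
--     r_ring = max(1, round(r_out * 0.56))
--     r_core = max(1, round(r_out * 0.34))
--
--     circle(lens_cx, lens_cy, r_out,  WHITE)
--     circle(lens_cx, lens_cy, r_body, COVER)
--     circle(lens_cx, lens_cy, r_ring, RING)
--     circle(lens_cx, lens_cy, r_core, DARK)
--
--     # Lens highlight dot (top-left quadrant)
--     if S >= 32:
--         hl_r  = max(1, round(r_out * 0.13))
--         hl_cx = lens_cx - round(r_out * 0.28)
--         hl_cy = lens_cy - round(r_out * 0.28)
--         circle(hl_cx, hl_cy, hl_r, HILITE)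
--
--     # ── 4. Shutter button — small rounded rect, top-right of rail ─────────
--     if S >= 32:
--         sh_w = max(2, round(S * 0.11))
--         sh_h = max(1, round(S * 0.06))
--         sh_x = bx1 - round(S * 0.06) - sh_w
--         sh_y = by0 + round(S * 0.05)
--         sh_r = max(1, round(sh_h * 0.5))
--         fill(sh_x + sh_r, sh_y,        sh_x + sh_w - sh_r, sh_y + sh_h, WHITE)
--         fill(sh_x,        sh_y + sh_r, sh_x + sh_w,        sh_y + sh_h, WHITE)
--         circle(sh_x + sh_r,        sh_y + sh_r, sh_r, WHITE)
--         circle(sh_x + sh_w - sh_r, sh_y + sh_r, sh_r, WHITE)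
--
--     # ── 5. Viewfinder window — small rounded rect, top-left of rail ───────
--     if S >= 48:
--         vf_w = max(3, round(S * 0.14))
--         vf_h = max(2, round(S * 0.08))
--         vf_x = bx0 + round(S * 0.08)
--         vf_y = by0 + round(S * 0.06)
--         vf_r = max(1, round(min(vf_w, vf_h) * 0.3))
--         fill(vf_x + vf_r, vf_y,        vf_x + vf_w - vf_r, vf_y + vf_h, RING)
--         fill(vf_x,        vf_y + vf_r, vf_x + vf_w,        vf_y + vf_h, RING)
--         circle(vf_x + vf_r,        vf_y + vf_r, vf_r, RING)
--         circle(vf_x + vf_w - vf_r, vf_y + vf_r, vf_r, RING)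
--
--     return px
-- ===== SOURCE B (Python) =====
-- # B: per-pixel classifier -- compute every layout parameter once, then colour each
-- # pixel independently by testing the shape layers in reverse z-order (first hit wins),
-- # instead of painting shapes into a mutable grid.
-- def draw_camera(S):
--     DARK   = ( 13,  71, 161, 255)
--     COVER  = ( 21, 101, 192, 255)
--     WHITE  = (255, 255, 255, 255)
--     RING   = (173, 210, 240, 255)
--     HILITE = (255, 255, 255, 180)
--
--     m   = max(1, round(S * 0.06))
--     rad = max(2, round(S * 0.12))
--     bx0, by0 = m, m
--     bx1, by1 = S - m, S - m
--     cxl, cxr = bx0 + rad, bx1 - rad          # corner-circle centres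
--     cyt, cyb = by0 + rad, by1 - rad
--
--     rail_h = max(2, round(S * 0.20))
--
--     lens_cx = S // 2
--     lens_cy = by0 + rail_h + round((by1 - by0 - rail_h) * 0.52)
--     r_out  = max(3, round(S * 0.28))
--     r_body = max(2, round(r_out * 0.76))
--     r_ring = max(1, round(r_out * 0.56))
--     r_core = max(1, round(r_out * 0.34))
--
--     hl_r  = max(1, round(r_out * 0.13))
--     hl_cx = lens_cx - round(r_out * 0.28)
--     hl_cy = lens_cy - round(r_out * 0.28)
--
--     sh_w = max(2, round(S * 0.11))
--     sh_h = max(1, round(S * 0.06))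
--     sh_x = bx1 - round(S * 0.06) - sh_w
--     sh_y = by0 + round(S * 0.05)
--     sh_r = max(1, round(sh_h * 0.5))
--
--     vf_w = max(3, round(S * 0.14))
--     vf_h = max(2, round(S * 0.08))
--     vf_x = bx0 + round(S * 0.08)
--     vf_y = by0 + round(S * 0.06)
--     vf_r = max(1, round(min(vf_w, vf_h) * 0.3))
--
--     def rect(x, y, x0, y0, x1, y1):
--         return x0 <= x < x1 and y0 <= y < y1
--
--     def disk(x, y, cx, cy, r):
--         return (x - cx) ** 2 + (y - cy) ** 2 <= r * r
--
--     def button(x, y, x0, y0, w, h, r):         # small rounded rect (round top corners)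
--         return (disk(x, y, x0 + w - r, y0 + r, r)
--                 or disk(x, y, x0 + r, y0 + r, r)
--                 or rect(x, y, x0, y0 + r, x0 + w, y0 + h)
--                 or rect(x, y, x0 + r, y0, x0 + w - r, y0 + h))
--
--     def rail(x, y):                            # dark top strip with rounded corners
--         return (rect(x, y, cxl, by0, cxr, cyt)
--                 or disk(x, y, cxr, cyt, rad)
--                 or disk(x, y, cxl, cyt, rad)
--                 or rect(x, y, bx0, cyt, bx1, by0 + rail_h)
--                 or rect(x, y, cxl, by0, cxr, by0 + rail_h))
--
--     def body(x, y):                            # blue rounded-rect camera body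
--         return (disk(x, y, cxr, cyb, rad)
--                 or disk(x, y, cxl, cyb, rad)
--                 or disk(x, y, cxr, cyt, rad)
--                 or disk(x, y, cxl, cyt, rad)
--                 or rect(x, y, bx0, cyt, bx1, cyb)
--                 or rect(x, y, cxl, by0, cxr, by1))
--
--     def color(x, y):
--         if S >= 48 and button(x, y, vf_x, vf_y, vf_w, vf_h, vf_r):
--             return RING
--         if S >= 32 and button(x, y, sh_x, sh_y, sh_w, sh_h, sh_r):
--             return WHITE
--         if S >= 32 and disk(x, y, hl_cx, hl_cy, hl_r):
--             return HILITE
--         if disk(x, y, lens_cx, lens_cy, r_core):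
--             return DARK
--         if disk(x, y, lens_cx, lens_cy, r_ring):
--             return RING
--         if disk(x, y, lens_cx, lens_cy, r_body):
--             return COVER
--         if disk(x, y, lens_cx, lens_cy, r_out):
--             return WHITE
--         if rail(x, y):
--             return DARK
--         if body(x, y):
--             return COVER
--         return (0, 0, 0, 0)
--
--     return [[color(x, y) for x in range(S)] for y in range(S)]
-- ===== Notes on version B (the rewrite author's own statement) =====
-- stated objective: alternative
-- what changed: B computes every layout parameter once and colours each pixel independently by testing the shape layers (viewfinder, shutter, highlight, lens rings, rail, body) in reverse z-order with pure boolean coverage tests, instead of sequentially painting shapes into a mutable grid.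
import Mathlib
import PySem

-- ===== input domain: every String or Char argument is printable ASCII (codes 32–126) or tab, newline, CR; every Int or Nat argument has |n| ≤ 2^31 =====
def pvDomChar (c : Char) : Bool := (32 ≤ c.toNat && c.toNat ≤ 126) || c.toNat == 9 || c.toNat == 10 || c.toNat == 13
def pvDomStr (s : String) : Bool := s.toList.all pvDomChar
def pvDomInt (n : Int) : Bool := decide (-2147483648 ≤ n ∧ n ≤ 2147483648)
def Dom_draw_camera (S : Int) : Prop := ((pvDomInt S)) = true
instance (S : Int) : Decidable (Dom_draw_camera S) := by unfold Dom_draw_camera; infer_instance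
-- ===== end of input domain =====

-- B replaces A's mutable-grid shape painting by a per-pixel classifier that tests
-- the shape layers in reverse z-order with pure boolean coverage tests (same output).

-- Shared exact integer model of Python's round(x * c), where c is the double
-- with exact value C / 2^s, intended value p / q (0 < q, 0 < s).  Both Pythons
-- evaluate the same float expression, so both ports share this helper.
-- Away from half-integer ties the float error (≲ 2^-52·|x·c|) cannot cross the
-- rounding boundary (margin ≥ 1/(2q)) for |x| ≤ 2^34, so nearest-int of x·p/q is
-- exact; at an exact tie t = N/2 the single product rounding fl(x·C/2^s) lands on
-- t (then banker's rounding applies) or beside it (then the sign of the error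
-- decides), which the integer comparison below reproduces exactly.
def pvRound (x p q C : Int) (s : Nat) : Int :=
  let num := 2 * x * p
  if PySem.Int.mod num (2 * q) ≠ q then
    PySem.Int.floordiv (num + q) (2 * q)
  else
    let N := PySem.Int.floordiv num q        -- odd; the tie is t = N / 2
    let k := PySem.Int.floordiv (N - 1) 2    -- floor of t
    let Δ := 2 * x * C - N * (2 : Int) ^ s   -- sign/size of fl(c)·x − t, scaled by 2^(s+1)
    let es := ((PySem.Int.bitLength N : Int) - 2 + (s : Int)).toNat
    if Δ.natAbs * 2 ^ 52 > 2 ^ es then (if Δ > 0 then k + 1 else k)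
    else if PySem.Int.mod k 2 = 0 then k else k + 1

-- ===== PORT A =====
def pvSetPx (S : Int) (g : List (List (Int × Int × Int × Int))) (x y : Int)
    (c : Int × Int × Int × Int) : List (List (Int × Int × Int × Int)) :=
  if 0 ≤ x ∧ x < S ∧ 0 ≤ y ∧ y < S then
    PySem.List.pySetD g y (PySem.List.pySetD (PySem.List.pyGetD g y []) x c)
  else g

def pvFill (S : Int) (g : List (List (Int × Int × Int × Int))) (x0 y0 x1 y1 : Int)
    (c : Int × Int × Int × Int) : List (List (Int × Int × Int × Int)) :=
  (PySem.List.pyRange (max 0 y0) (min S y1) 1).foldl (fun g y =>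
    (PySem.List.pyRange (max 0 x0) (min S x1) 1).foldl (fun g x =>
      pvSetPx S g x y c) g) g

-- every call site passes ints, so int(r) = r and int(cx) = cx, int(cy) = cy
def pvCircle (S : Int) (g : List (List (Int × Int × Int × Int))) (cx cy r : Int)
    (c : Int × Int × Int × Int) : List (List (Int × Int × Int × Int)) :=
  (PySem.List.pyRange (-r) (r + 1) 1).foldl (fun g dy =>
    (PySem.List.pyRange (-r) (r + 1) 1).foldl (fun g dx =>
      if dx * dx + dy * dy ≤ r * r then pvSetPx S g (cx + dx) (cy + dy) c else g) g) g

def draw_camera (S : Int) : List (List (Int × Int × Int × Int)) :=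
  let px : List (List (Int × Int × Int × Int)) :=
    (PySem.List.pyRange 0 S 1).map (fun _ => PySem.List.pyRepeat [((0:Int), (0:Int), (0:Int), (0:Int))] S)
  let DARK   : Int × Int × Int × Int := (13, 71, 161, 255)
  let COVER  : Int × Int × Int × Int := (21, 101, 192, 255)
  let WHITE  : Int × Int × Int × Int := (255, 255, 255, 255)
  let RING   : Int × Int × Int × Int := (173, 210, 240, 255)
  let HILITE : Int × Int × Int × Int := (255, 255, 255, 180)
  let m   := max 1 (pvRound S 3 50 1080863910568919 54)        -- round(S*0.06)
  let rad := max 2 (pvRound S 3 25 1080863910568919 53)        -- round(S*0.12)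
  let bx0 := m
  let by0 := m
  let bx1 := S - m
  let by1 := S - m
  let px := pvFill S px (bx0 + rad) by0 (bx1 - rad) by1 COVER
  let px := pvFill S px bx0 (by0 + rad) bx1 (by1 - rad) COVER
  let px := [(bx0 + rad, by0 + rad), (bx1 - rad, by0 + rad),
             (bx0 + rad, by1 - rad), (bx1 - rad, by1 - rad)].foldl
              (fun g cc => pvCircle S g cc.1 cc.2 rad COVER) px
  let rail_h := max 2 (pvRound S 1 5 3602879701896397 54)      -- round(S*0.20)
  let px := pvFill S px (bx0 + rad) by0 (bx1 - rad) (by0 + rail_h) DARK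
  let px := pvFill S px bx0 (by0 + rad) bx1 (by0 + rail_h) DARK
  let px := pvCircle S px (bx0 + rad) (by0 + rad) rad DARK
  let px := pvCircle S px (bx1 - rad) (by0 + rad) rad DARK
  let px := pvFill S px (bx0 + rad) by0 (bx1 - rad) (by0 + rad) DARK
  let lens_cx := PySem.Int.floordiv S 2
  let lens_cy := by0 + rail_h + pvRound (by1 - by0 - rail_h) 13 25 1170935903116329 51  -- round(·*0.52)
  let r_out  := max 3 (pvRound S 7 25 1261007895663739 52)       -- round(S*0.28)
  let r_body := max 2 (pvRound r_out 19 25 3422735716801577 52)  -- round(r_out*0.76)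
  let r_ring := max 1 (pvRound r_out 14 25 1261007895663739 51)  -- round(r_out*0.56)
  let r_core := max 1 (pvRound r_out 17 50 6124895493223875 54)  -- round(r_out*0.34)
  let px := pvCircle S px lens_cx lens_cy r_out  WHITE
  let px := pvCircle S px lens_cx lens_cy r_body COVER
  let px := pvCircle S px lens_cx lens_cy r_ring RING
  let px := pvCircle S px lens_cx lens_cy r_core DARK
  let px := if S ≥ 32 then
      let hl_r  := max 1 (pvRound r_out 13 100 1170935903116329 53)  -- round(r_out*0.13)
      let hl_cx := lens_cx - pvRound r_out 7 25 1261007895663739 52  -- round(r_out*0.28)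
      let hl_cy := lens_cy - pvRound r_out 7 25 1261007895663739 52
      pvCircle S px hl_cx hl_cy hl_r HILITE
    else px
  let px := if S ≥ 32 then
      let sh_w := max 2 (pvRound S 11 100 7926335344172073 56)       -- round(S*0.11)
      let sh_h := max 1 (pvRound S 3 50 1080863910568919 54)         -- round(S*0.06)
      let sh_x := bx1 - pvRound S 1 20 3602879701896397 56 - sh_w    -- round(S*0.05)
      let sh_y := by0 + pvRound S 1 20 3602879701896397 56
      let sh_r := max 1 (pvRound sh_h 1 2 1 1)                       -- round(sh_h*0.5)
      let px := pvFill S px (sh_x + sh_r) sh_y (sh_x + sh_w - sh_r) (sh_y + sh_h) WHITE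
      let px := pvFill S px sh_x (sh_y + sh_r) (sh_x + sh_w) (sh_y + sh_h) WHITE
      let px := pvCircle S px (sh_x + sh_r) (sh_y + sh_r) sh_r WHITE
      pvCircle S px (sh_x + sh_w - sh_r) (sh_y + sh_r) sh_r WHITE
    else px
  let px := if S ≥ 48 then
      let vf_w := max 3 (pvRound S 7 50 1261007895663739 53)         -- round(S*0.14)
      let vf_h := max 2 (pvRound S 2 25 5764607523034235 56)         -- round(S*0.08)
      let vf_x := bx0 + pvRound S 2 25 5764607523034235 56
      let vf_y := by0 + pvRound S 3 50 1080863910568919 54           -- round(S*0.06)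
      let vf_r := max 1 (pvRound (min vf_w vf_h) 3 10 5404319552844595 54)  -- round(·*0.3)
      let px := pvFill S px (vf_x + vf_r) vf_y (vf_x + vf_w - vf_r) (vf_y + vf_h) RING
      let px := pvFill S px vf_x (vf_y + vf_r) (vf_x + vf_w) (vf_y + vf_h) RING
      let px := pvCircle S px (vf_x + vf_r) (vf_y + vf_r) vf_r RING
      pvCircle S px (vf_x + vf_w - vf_r) (vf_y + vf_r) vf_r RING
    else px
  px

-- ===== PORT B =====
-- Source B's rect(x, y, x0, y0, x1, y1)
def pvRect (x y x0 y0 x1 y1 : Int) : Bool := decide (x0 ≤ x ∧ x < x1 ∧ y0 ≤ y ∧ y < y1)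

-- Source B's disk(x, y, cx, cy, r)
def pvDisk (x y cx cy r : Int) : Bool := decide ((x - cx) ^ 2 + (y - cy) ^ 2 ≤ r * r)

-- Source B's button(x, y, x0, y0, w, h, r)
def pvButtonCov (x y x0 y0 w h r : Int) : Bool :=
  pvDisk x y (x0 + w - r) (y0 + r) r || pvDisk x y (x0 + r) (y0 + r) r ||
  pvRect x y x0 (y0 + r) (x0 + w) (y0 + h) || pvRect x y (x0 + r) y0 (x0 + w - r) (y0 + h)

-- Source B's color(x, y) closure, with the enclosing parameters made explicit
def pvColorGen (S m rad rail_h lens_cx lens_cy r_out r_body r_ring r_core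
    hl_cx hl_cy hl_r sh_x sh_y sh_w sh_h sh_r vf_x vf_y vf_w vf_h vf_r x y : Int) :
    Int × Int × Int × Int :=
  let bx0 := m
  let by0 := m
  let bx1 := S - m
  let by1 := S - m
  let cxl := bx0 + rad
  let cxr := bx1 - rad
  let cyt := by0 + rad
  let cyb := by1 - rad
  if S ≥ 48 ∧ pvButtonCov x y vf_x vf_y vf_w vf_h vf_r then (173, 210, 240, 255)
  else if S ≥ 32 ∧ pvButtonCov x y sh_x sh_y sh_w sh_h sh_r then (255, 255, 255, 255)
  else if S ≥ 32 ∧ pvDisk x y hl_cx hl_cy hl_r then (255, 255, 255, 180)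
  else if pvDisk x y lens_cx lens_cy r_core then (13, 71, 161, 255)
  else if pvDisk x y lens_cx lens_cy r_ring then (173, 210, 240, 255)
  else if pvDisk x y lens_cx lens_cy r_body then (21, 101, 192, 255)
  else if pvDisk x y lens_cx lens_cy r_out then (255, 255, 255, 255)
  else if pvRect x y cxl by0 cxr cyt || pvDisk x y cxr cyt rad || pvDisk x y cxl cyt rad ||
          pvRect x y bx0 cyt bx1 (by0 + rail_h) || pvRect x y cxl by0 cxr (by0 + rail_h) then
    (13, 71, 161, 255)
  else if pvDisk x y cxr cyb rad || pvDisk x y cxl cyb rad || pvDisk x y cxr cyt rad ||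
          pvDisk x y cxl cyt rad || pvRect x y bx0 cyt bx1 cyb || pvRect x y cxl by0 cxr by1 then
    (21, 101, 192, 255)
  else (0, 0, 0, 0)

def draw_camera_alt (S : Int) : List (List (Int × Int × Int × Int)) :=
  let m   := max 1 (pvRound S 3 50 1080863910568919 54)
  let rad := max 2 (pvRound S 3 25 1080863910568919 53)
  let bx0 := m
  let by0 := m
  let bx1 := S - m
  let by1 := S - m
  let rail_h := max 2 (pvRound S 1 5 3602879701896397 54)
  let lens_cx := PySem.Int.floordiv S 2
  let lens_cy := by0 + rail_h + pvRound (by1 - by0 - rail_h) 13 25 1170935903116329 51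
  let r_out  := max 3 (pvRound S 7 25 1261007895663739 52)
  let r_body := max 2 (pvRound r_out 19 25 3422735716801577 52)
  let r_ring := max 1 (pvRound r_out 14 25 1261007895663739 51)
  let r_core := max 1 (pvRound r_out 17 50 6124895493223875 54)
  let hl_r  := max 1 (pvRound r_out 13 100 1170935903116329 53)
  let hl_cx := lens_cx - pvRound r_out 7 25 1261007895663739 52
  let hl_cy := lens_cy - pvRound r_out 7 25 1261007895663739 52
  let sh_w := max 2 (pvRound S 11 100 7926335344172073 56)
  let sh_h := max 1 (pvRound S 3 50 1080863910568919 54)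
  let sh_x := bx1 - pvRound S 1 20 3602879701896397 56 - sh_w
  let sh_y := by0 + pvRound S 1 20 3602879701896397 56
  let sh_r := max 1 (pvRound sh_h 1 2 1 1)
  let vf_w := max 3 (pvRound S 7 50 1261007895663739 53)
  let vf_h := max 2 (pvRound S 2 25 5764607523034235 56)
  let vf_x := bx0 + pvRound S 2 25 5764607523034235 56
  let vf_y := by0 + pvRound S 3 50 1080863910568919 54
  let vf_r := max 1 (pvRound (min vf_w vf_h) 3 10 5404319552844595 54)
  (PySem.List.pyRange 0 S 1).map (fun y =>
    (PySem.List.pyRange 0 S 1).map (fun x =>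
      pvColorGen S m rad rail_h lens_cx lens_cy r_out r_body r_ring r_core
        hl_cx hl_cy hl_r sh_x sh_y sh_w sh_h sh_r vf_x vf_y vf_w vf_h vf_r x y))

-- ===== PRECONDITION & SPEC =====
def Spec_draw_camera (S : Int) (out : List (List (Int × Int × Int × Int))) : Prop := out = draw_camera_alt S
instance (S : Int) (out : List (List (Int × Int × Int × Int))) : Decidable (Spec_draw_camera S out) := by unfold Spec_draw_camera; infer_instance

-- ===== CLAIM (what is proved, stated in full; the proofs are below) =====
def Claim_equal_draw_camera : Prop := ∀ (S : Int), Dom_draw_camera S → Spec_draw_camera S (draw_camera S)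

-- ===== LEMMAS AND PROOFS =====

-- proof-side shape type (no colour) and its coverage test
inductive PvShape
  | rect : Int → Int → Int → Int → PvShape
  | disk : Int → Int → Int → PvShape
deriving DecidableEq, Repr

def pvCoverS (s : PvShape) (x y : Int) : Bool :=
  match s with
  | .rect x0 y0 x1 y1 => pvRect x y x0 y0 x1 y1
  | .disk cx cy r => pvDisk x y cx cy r

def pvShapeOK : PvShape → Prop
  | .rect _ _ _ _ => True
  | .disk _ _ r => 0 ≤ r

-- the drawing layers of A, as (shapes, colour) groups in REVERSE paint order,
-- each group's shape list also reversed
def pvGroupsGen (S m rad rail_h lens_cx lens_cy r_out r_body r_ring r_core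
    hl_cx hl_cy hl_r sh_x sh_y sh_w sh_h sh_r vf_x vf_y vf_w vf_h vf_r : Int) :
    List (List PvShape × (Int × Int × Int × Int)) :=
  let bx0 := m
  let by0 := m
  let bx1 := S - m
  let by1 := S - m
  (if S ≥ 48 then
    [([PvShape.disk (vf_x + vf_w - vf_r) (vf_y + vf_r) vf_r,
       PvShape.disk (vf_x + vf_r) (vf_y + vf_r) vf_r,
       PvShape.rect vf_x (vf_y + vf_r) (vf_x + vf_w) (vf_y + vf_h),
       PvShape.rect (vf_x + vf_r) vf_y (vf_x + vf_w - vf_r) (vf_y + vf_h)],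
      ((173, 210, 240, 255) : Int × Int × Int × Int))]
   else []) ++
  (if S ≥ 32 then
    [([PvShape.disk (sh_x + sh_w - sh_r) (sh_y + sh_r) sh_r,
       PvShape.disk (sh_x + sh_r) (sh_y + sh_r) sh_r,
       PvShape.rect sh_x (sh_y + sh_r) (sh_x + sh_w) (sh_y + sh_h),
       PvShape.rect (sh_x + sh_r) sh_y (sh_x + sh_w - sh_r) (sh_y + sh_h)],
      ((255, 255, 255, 255) : Int × Int × Int × Int))]
   else []) ++
  (if S ≥ 32 then
    [([PvShape.disk hl_cx hl_cy hl_r], ((255, 255, 255, 180) : Int × Int × Int × Int))]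
   else []) ++
  [([PvShape.disk lens_cx lens_cy r_core], (13, 71, 161, 255)),
   ([PvShape.disk lens_cx lens_cy r_ring], (173, 210, 240, 255)),
   ([PvShape.disk lens_cx lens_cy r_body], (21, 101, 192, 255)),
   ([PvShape.disk lens_cx lens_cy r_out], (255, 255, 255, 255)),
   ([PvShape.rect (bx0 + rad) by0 (bx1 - rad) (by0 + rad),
     PvShape.disk (bx1 - rad) (by0 + rad) rad,
     PvShape.disk (bx0 + rad) (by0 + rad) rad,
     PvShape.rect bx0 (by0 + rad) bx1 (by0 + rail_h),
     PvShape.rect (bx0 + rad) by0 (bx1 - rad) (by0 + rail_h)], (13, 71, 161, 255)),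
   ([PvShape.disk (bx1 - rad) (by1 - rad) rad,
     PvShape.disk (bx0 + rad) (by1 - rad) rad,
     PvShape.disk (bx1 - rad) (by0 + rad) rad,
     PvShape.disk (bx0 + rad) (by0 + rad) rad,
     PvShape.rect bx0 (by0 + rad) bx1 (by1 - rad),
     PvShape.rect (bx0 + rad) by0 (bx1 - rad) by1], (21, 101, 192, 255))]

-- A's layout parameters, named
def pvM (S : Int) : Int := max 1 (pvRound S 3 50 1080863910568919 54)
def pvRadP (S : Int) : Int := max 2 (pvRound S 3 25 1080863910568919 53)
def pvRailH (S : Int) : Int := max 2 (pvRound S 1 5 3602879701896397 54)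
def pvLensCx (S : Int) : Int := PySem.Int.floordiv S 2
def pvLensCy (S : Int) : Int :=
  pvM S + pvRailH S + pvRound (S - pvM S - pvM S - pvRailH S) 13 25 1170935903116329 51
def pvROut (S : Int) : Int := max 3 (pvRound S 7 25 1261007895663739 52)
def pvRBody (S : Int) : Int := max 2 (pvRound (pvROut S) 19 25 3422735716801577 52)
def pvRRing (S : Int) : Int := max 1 (pvRound (pvROut S) 14 25 1261007895663739 51)
def pvRCore (S : Int) : Int := max 1 (pvRound (pvROut S) 17 50 6124895493223875 54)
def pvHlR (S : Int) : Int := max 1 (pvRound (pvROut S) 13 100 1170935903116329 53)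
def pvHlCx (S : Int) : Int := pvLensCx S - pvRound (pvROut S) 7 25 1261007895663739 52
def pvHlCy (S : Int) : Int := pvLensCy S - pvRound (pvROut S) 7 25 1261007895663739 52
def pvShW (S : Int) : Int := max 2 (pvRound S 11 100 7926335344172073 56)
def pvShH (S : Int) : Int := max 1 (pvRound S 3 50 1080863910568919 54)
def pvShX (S : Int) : Int := S - pvM S - pvRound S 1 20 3602879701896397 56 - pvShW S
def pvShY (S : Int) : Int := pvM S + pvRound S 1 20 3602879701896397 56
def pvShR (S : Int) : Int := max 1 (pvRound (pvShH S) 1 2 1 1)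
def pvVfW (S : Int) : Int := max 3 (pvRound S 7 50 1261007895663739 53)
def pvVfH (S : Int) : Int := max 2 (pvRound S 2 25 5764607523034235 56)
def pvVfX (S : Int) : Int := pvM S + pvRound S 2 25 5764607523034235 56
def pvVfY (S : Int) : Int := pvM S + pvRound S 3 50 1080863910568919 54
def pvVfR (S : Int) : Int := max 1 (pvRound (min (pvVfW S) (pvVfH S)) 3 10 5404319552844595 54)

def pvGroups (S : Int) : List (List PvShape × (Int × Int × Int × Int)) :=
  pvGroupsGen S (pvM S) (pvRadP S) (pvRailH S) (pvLensCx S) (pvLensCy S) (pvROut S)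
    (pvRBody S) (pvRRing S) (pvRCore S) (pvHlCx S) (pvHlCy S) (pvHlR S)
    (pvShX S) (pvShY S) (pvShW S) (pvShH S) (pvShR S)
    (pvVfX S) (pvVfY S) (pvVfW S) (pvVfH S) (pvVfR S)

-- proof-side view of A: one painting step per (shape, colour)
def pvPaint (S : Int) (g : List (List (Int × Int × Int × Int))) :
    PvShape × (Int × Int × Int × Int) → List (List (Int × Int × Int × Int))
  | (.rect x0 y0 x1 y1, c) => pvFill S g x0 y0 x1 y1 c
  | (.disk cx cy r, c) => pvCircle S g cx cy r c

def pvInit (S : Int) : List (List (Int × Int × Int × Int)) :=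
  (PySem.List.pyRange 0 S 1).map (fun _ => PySem.List.pyRepeat [((0:Int), (0:Int), (0:Int), (0:Int))] S)

def pvSq (S : Int) (g : List (List (Int × Int × Int × Int))) : Prop :=
  g.length = S.toNat ∧ ∀ row ∈ g, row.length = S.toNat

def pvPix (g : List (List (Int × Int × Int × Int))) (y x : Int) : Int × Int × Int × Int :=
  (g.getD y.toNat []).getD x.toNat (0, 0, 0, 0)

theorem pvSetPx_sq {S : Int} {g : List (List (Int × Int × Int × Int))} (hg : pvSq S g)
    (x y : Int) (c : Int × Int × Int × Int) : pvSq S (pvSetPx S g x y c) := by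
  obtain ⟨hlen, hrow⟩ := hg
  unfold pvSetPx
  split
  · rename_i h
    obtain ⟨hx0, hxS, hy0, hyS⟩ := h
    rw [PySem.List.pySetD_of_nonneg _ _ hy0, PySem.List.pySetD_of_nonneg _ _ hx0]
    refine ⟨by simpa using hlen, ?_⟩
    intro row hr
    rcases List.mem_or_eq_of_mem_set hr with h' | h'
    · exact hrow _ h'
    · subst h'
      rw [List.length_set,
        PySem.List.pyGetD_eq_getElem g _ hy0 (by omega)]
      exact hrow _ (List.getElem_mem _)
  · exact ⟨hlen, hrow⟩

theorem pvSetPx_pix {S : Int} {g : List (List (Int × Int × Int × Int))} (hg : pvSq S g)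
    {x' y' : Int} (hx1 : 0 ≤ x') (hx2 : x' < S) (hy1 : 0 ≤ y') (hy2 : y' < S)
    (x y : Int) (c : Int × Int × Int × Int) :
    pvPix (pvSetPx S g x y c) y' x' = if x = x' ∧ y = y' then c else pvPix g y' x' := by
  obtain ⟨hlen, hrow⟩ := hg
  unfold pvSetPx
  split
  · rename_i h
    obtain ⟨hx0, hxS, hy0, hyS⟩ := h
    rw [PySem.List.pySetD_of_nonneg _ _ hy0, PySem.List.pySetD_of_nonneg _ _ hx0]
    have hylt : y.toNat < g.length := by omega
    have hrow0 : PySem.List.pyGetD g y [] = g[y.toNat] :=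
      PySem.List.pyGetD_eq_getElem g _ hy0 (by omega)
    have hrl : (PySem.List.pyGetD g y []).length = S.toNat := by
      rw [hrow0]; exact hrow _ (List.getElem_mem _)
    unfold pvPix
    rcases eq_or_ne y y' with hyy | hyy
    · subst hyy
      have hgy : g.getD y.toNat [] = g[y.toNat] := by
        rw [List.getD_eq_getElem?_getD, List.getElem?_eq_getElem hylt]; rfl
      have hset : (g.set y.toNat ((PySem.List.pyGetD g y []).set x.toNat c)).getD y.toNat []
          = (PySem.List.pyGetD g y []).set x.toNat c := by
        rw [List.getD_eq_getElem?_getD, List.getElem?_set, if_pos rfl, if_pos hylt]; rfl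
      rw [hset, hgy]
      rcases eq_or_ne x x' with hxx | hxx
      · subst hxx
        rw [if_pos ⟨rfl, rfl⟩, List.getD_eq_getElem?_getD, List.getElem?_set, if_pos rfl,
          if_pos (by omega)]
        rfl
      · rw [if_neg (by simp [hxx]), List.getD_eq_getElem?_getD, List.getElem?_set,
          if_neg (by omega), hrow0, List.getD_eq_getElem?_getD]
    · have hset : (g.set y.toNat ((PySem.List.pyGetD g y []).set x.toNat c)).getD y'.toNat []
          = g.getD y'.toNat [] := by
        rw [List.getD_eq_getElem?_getD, List.getElem?_set, if_neg (by omega),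
          ← List.getD_eq_getElem?_getD]
      rw [hset, if_neg (by simp [hyy])]
  · rename_i h
    rw [if_neg (by rintro ⟨rfl, rfl⟩; exact h ⟨hx1, hx2, hy1, hy2⟩)]

theorem pvFoldl_pix {ι : Type} (L : List ι) (F : List (List (Int × Int × Int × Int)) → ι → List (List (Int × Int × Int × Int)))
    (W : ι → Bool) (c : Int × Int × Int × Int) (S x' y' : Int)
    (hF : ∀ g i, pvSq S g → pvSq S (F g i) ∧ pvPix (F g i) y' x' = (if W i then c else pvPix g y' x')) :
    ∀ g, pvSq S g → pvSq S (L.foldl F g) ∧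
      pvPix (L.foldl F g) y' x' = (if L.any W then c else pvPix g y' x') := by
  induction L with
  | nil => intro g hg; exact ⟨hg, by simp⟩
  | cons i L ih =>
    intro g hg
    obtain ⟨h1, h2⟩ := hF g i hg
    obtain ⟨h3, h4⟩ := ih (F g i) h1
    refine ⟨h3, ?_⟩
    simp only [List.foldl_cons, List.any_cons] at *
    rw [h4, h2]
    by_cases hw : W i = true <;> by_cases hl : L.any W = true <;> simp [hw, hl]

theorem pvFill_pix {S : Int} {g : List (List (Int × Int × Int × Int))} (hg : pvSq S g)
    {x' y' : Int} (hx1 : 0 ≤ x') (hx2 : x' < S) (hy1 : 0 ≤ y') (hy2 : y' < S)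
    (x0 y0 x1 y1 : Int) (c : Int × Int × Int × Int) :
    pvSq S (pvFill S g x0 y0 x1 y1 c) ∧
    pvPix (pvFill S g x0 y0 x1 y1 c) y' x' =
      if x0 ≤ x' ∧ x' < x1 ∧ y0 ≤ y' ∧ y' < y1 then c else pvPix g y' x' := by
  have hmain := pvFoldl_pix (PySem.List.pyRange (max 0 y0) (min S y1) 1)
      (fun g y => (PySem.List.pyRange (max 0 x0) (min S x1) 1).foldl (fun g x => pvSetPx S g x y c) g)
      (fun y => (PySem.List.pyRange (max 0 x0) (min S x1) 1).any (fun x => decide (x = x' ∧ y = y')))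
      c S x' y' ?_ g hg
  · obtain ⟨hsq, hpix⟩ := hmain
    refine ⟨hsq, ?_⟩
    show pvPix ((PySem.List.pyRange (max 0 y0) (min S y1) 1).foldl _ g) y' x' = _
    rw [hpix]
    by_cases hc : x0 ≤ x' ∧ x' < x1 ∧ y0 ≤ y' ∧ y' < y1
    · rw [if_pos ?_, if_pos hc]
      simp only [List.any_eq_true, PySem.List.mem_pyRange_one, decide_eq_true_eq]
      exact ⟨y', by omega, x', by omega, rfl, rfl⟩
    · rw [if_neg ?_, if_neg hc]
      simp only [List.any_eq_true, PySem.List.mem_pyRange_one, decide_eq_true_eq]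
      rintro ⟨yy, hyy, xx, hxx, rfl, rfl⟩
      omega
  · intro g2 y hg2
    have hinner := pvFoldl_pix (PySem.List.pyRange (max 0 x0) (min S x1) 1)
        (fun g x => pvSetPx S g x y c)
        (fun x => decide (x = x' ∧ y = y')) c S x' y' ?_ g2 hg2
    · exact hinner
    · intro g3 xx hg3
      refine ⟨pvSetPx_sq hg3 xx y c, ?_⟩
      rw [pvSetPx_pix hg3 hx1 hx2 hy1 hy2 xx y c]
      by_cases h : xx = x' ∧ y = y' <;> simp [h]

theorem pvCircle_pix {S : Int} {g : List (List (Int × Int × Int × Int))} (hg : pvSq S g)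
    {x' y' : Int} (hx1 : 0 ≤ x') (hx2 : x' < S) (hy1 : 0 ≤ y') (hy2 : y' < S)
    (cx cy r : Int) (hr : 0 ≤ r) (c : Int × Int × Int × Int) :
    pvSq S (pvCircle S g cx cy r c) ∧
    pvPix (pvCircle S g cx cy r c) y' x' =
      if (x' - cx) * (x' - cx) + (y' - cy) * (y' - cy) ≤ r * r then c else pvPix g y' x' := by
  have hmain := pvFoldl_pix (PySem.List.pyRange (-r) (r + 1) 1)
      (fun g dy => (PySem.List.pyRange (-r) (r + 1) 1).foldl
        (fun g dx => if dx * dx + dy * dy ≤ r * r then pvSetPx S g (cx + dx) (cy + dy) c else g) g)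
      (fun dy => (PySem.List.pyRange (-r) (r + 1) 1).any
        (fun dx => decide (dx * dx + dy * dy ≤ r * r ∧ cx + dx = x' ∧ cy + dy = y')))
      c S x' y' ?_ g hg
  · obtain ⟨hsq, hpix⟩ := hmain
    refine ⟨hsq, ?_⟩
    show pvPix ((PySem.List.pyRange (-r) (r + 1) 1).foldl _ g) y' x' = _
    rw [hpix]
    by_cases hc : (x' - cx) * (x' - cx) + (y' - cy) * (y' - cy) ≤ r * r
    · rw [if_pos ?_, if_pos hc]
      simp only [List.any_eq_true, PySem.List.mem_pyRange_one, decide_eq_true_eq]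
      have hb1 : -r ≤ x' - cx ∧ x' - cx ≤ r := by
        constructor <;> nlinarith [mul_self_nonneg (x' - cx - r), mul_self_nonneg (x' - cx + r),
          mul_self_nonneg (y' - cy)]
      have hb2 : -r ≤ y' - cy ∧ y' - cy ≤ r := by
        constructor <;> nlinarith [mul_self_nonneg (y' - cy - r), mul_self_nonneg (y' - cy + r),
          mul_self_nonneg (x' - cx)]
      exact ⟨y' - cy, by omega, x' - cx, by omega, hc, by omega, by omega⟩
    · rw [if_neg ?_, if_neg hc]
      simp only [List.any_eq_true, PySem.List.mem_pyRange_one, decide_eq_true_eq]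
      rintro ⟨dy, hdy, dx, hdx, hdist, hx, hy⟩
      apply hc
      have hdx' : dx = x' - cx := by omega
      have hdy' : dy = y' - cy := by omega
      rw [hdx', hdy'] at hdist
      linarith
  · intro g2 dy hg2
    have hinner := pvFoldl_pix (PySem.List.pyRange (-r) (r + 1) 1)
        (fun g dx => if dx * dx + dy * dy ≤ r * r then pvSetPx S g (cx + dx) (cy + dy) c else g)
        (fun dx => decide (dx * dx + dy * dy ≤ r * r ∧ cx + dx = x' ∧ cy + dy = y'))
        c S x' y' ?_ g2 hg2
    · exact hinner
    · intro g3 dx hg3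
      beta_reduce
      by_cases hd : dx * dx + dy * dy ≤ r * r
      · refine ⟨by rw [if_pos hd]; exact pvSetPx_sq hg3 _ _ c, ?_⟩
        rw [if_pos hd, pvSetPx_pix hg3 hx1 hx2 hy1 hy2 (cx + dx) (cy + dy) c]
        by_cases h : cx + dx = x' ∧ cy + dy = y' <;> simp [h, hd]
      · refine ⟨by rw [if_neg hd]; exact hg3, ?_⟩
        rw [if_neg hd, if_neg (by simp [hd])]

theorem pvPaint_pix {S : Int} {g : List (List (Int × Int × Int × Int))} (hg : pvSq S g)
    {x' y' : Int} (hx1 : 0 ≤ x') (hx2 : x' < S) (hy1 : 0 ≤ y') (hy2 : y' < S)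
    (p : PvShape × (Int × Int × Int × Int)) (hp : pvShapeOK p.1) :
    pvSq S (pvPaint S g p) ∧
    pvPix (pvPaint S g p) y' x' = if pvCoverS p.1 x' y' then p.2 else pvPix g y' x' := by
  obtain ⟨s, c⟩ := p
  cases s with
  | rect x0 y0 x1 y1 =>
    obtain ⟨h1, h2⟩ := pvFill_pix hg hx1 hx2 hy1 hy2 x0 y0 x1 y1 c
    refine ⟨h1, ?_⟩
    rw [show pvPaint S g (PvShape.rect x0 y0 x1 y1, c) = pvFill S g x0 y0 x1 y1 c from rfl, h2]
    simp [pvCoverS, pvRect]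
  | disk cx cy r =>
    obtain ⟨h1, h2⟩ := pvCircle_pix hg hx1 hx2 hy1 hy2 cx cy r hp c
    refine ⟨h1, ?_⟩
    rw [show pvPaint S g (PvShape.disk cx cy r, c) = pvCircle S g cx cy r c from rfl, h2]
    simp [pvCoverS, pvDisk, pow_two]

theorem pvPaintList_pix {S : Int} (P : List (PvShape × (Int × Int × Int × Int)))
    {x' y' : Int} (hx1 : 0 ≤ x') (hx2 : x' < S) (hy1 : 0 ≤ y') (hy2 : y' < S)
    (hP : ∀ p ∈ P, pvShapeOK p.1) :
    ∀ g, pvSq S g → pvSq S (P.foldl (pvPaint S) g) ∧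
      pvPix (P.foldl (pvPaint S) g) y' x' =
        (((P.reverse.find? (fun p => pvCoverS p.1 x' y')).map Prod.snd).getD (pvPix g y' x')) := by
  induction P with
  | nil => intro g hg; exact ⟨hg, by simp⟩
  | cons p P ih =>
    intro g hg
    obtain ⟨h1, h2⟩ := pvPaint_pix hg hx1 hx2 hy1 hy2 p (hP p (by simp))
    obtain ⟨h3, h4⟩ := ih (fun q hq => hP q (by simp [hq])) (pvPaint S g p) h1
    refine ⟨h3, ?_⟩
    rw [List.foldl_cons, h4, h2]
    rw [List.reverse_cons, List.find?_append]
    cases hf : P.reverse.find? (fun p => pvCoverS p.1 x' y') with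
    | some q => simp
    | none => cases hc : pvCoverS p.1 x' y' <;> simp [hc]

theorem pvFoldl_sq {ι : Type} {S : Int} (L : List ι)
    (F : List (List (Int × Int × Int × Int)) → ι → List (List (Int × Int × Int × Int)))
    (hF : ∀ g i, pvSq S g → pvSq S (F g i)) :
    ∀ g, pvSq S g → pvSq S (L.foldl F g) := by
  induction L with
  | nil => intro g hg; simpa using hg
  | cons i L ih => intro g hg; exact ih (F g i) (hF g i hg)

theorem pvPaint_sq {S : Int} {g : List (List (Int × Int × Int × Int))} (hg : pvSq S g)
    (p : PvShape × (Int × Int × Int × Int)) : pvSq S (pvPaint S g p) := by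
  obtain ⟨s, c⟩ := p
  cases s with
  | rect x0 y0 x1 y1 =>
    exact pvFoldl_sq _ _ (fun g y hg => pvFoldl_sq _ _ (fun g x hg => pvSetPx_sq hg x y c) g hg) g hg
  | disk cx cy r =>
    refine pvFoldl_sq _ _ (fun g dy hg => pvFoldl_sq _ _ (fun g dx hg => ?_) g hg) g hg
    beta_reduce
    split
    · exact pvSetPx_sq hg _ _ c
    · exact hg

theorem pvGroups_ok (S : Int) :
    ∀ p ∈ ((pvGroups S).flatMap (fun g => g.1.map (fun s => (s, g.2)))).reverse, pvShapeOK p.1 := by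
  intro p hp
  rw [List.mem_reverse] at hp
  by_cases h48 : S ≥ 48 <;> by_cases h32 : S ≥ 32 <;>
    simp only [pvGroups, pvGroupsGen, h48, h32, if_true, if_false,
      List.flatMap_cons, List.flatMap_nil, List.map_cons, List.map_nil,
      List.append_nil, List.nil_append, List.cons_append,
      List.mem_cons, List.not_mem_nil, or_false] at hp <;>
    (repeat' (rcases hp with rfl | hp)) <;> (try subst hp) <;>
    simp [pvShapeOK, pvRadP, pvROut, pvRBody, pvRRing, pvRCore, pvHlR, pvShR, pvVfR] <;>
    omega

theorem pvInit_sq (S : Int) : pvSq S (pvInit S) := by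
  constructor
  · simp [pvInit, PySem.List.length_pyRange_one]
  · intro row hr
    simp only [pvInit, List.mem_map] at hr
    obtain ⟨y, _, rfl⟩ := hr
    rw [PySem.List.pyRepeat_singleton, List.length_replicate]

theorem pvInit_pix (S : Int) (y x : Int) : pvPix (pvInit S) y x = (0, 0, 0, 0) := by
  unfold pvPix
  have h : pvInit S = List.replicate (PySem.List.pyRange 0 S 1).length
      (List.replicate S.toNat ((0, 0, 0, 0) : Int × Int × Int × Int)) := by
    simp [pvInit, PySem.List.pyRepeat_singleton, List.map_const']
  rw [h]
  simp only [List.getD_eq_getElem?_getD, List.getElem?_replicate]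
  split
  · simp only [Option.getD_some, List.getElem?_replicate]
    split <;> rfl
  · simp

theorem draw_camera_eq_paint (S : Int) :
    draw_camera S =
      (((pvGroups S).flatMap (fun g => g.1.map (fun s => (s, g.2)))).reverse).foldl
        (pvPaint S) (pvInit S) := by
  by_cases h32 : S ≥ 32 <;> by_cases h48 : S ≥ 48 <;>
    simp only [draw_camera, pvGroups, pvGroupsGen, pvM, pvRadP, pvRailH, pvLensCx, pvLensCy,
      pvROut, pvRBody, pvRRing, pvRCore, pvHlR, pvHlCx, pvHlCy, pvShW, pvShH, pvShX, pvShY, pvShR,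
      pvVfW, pvVfH, pvVfX, pvVfY, pvVfR, pvInit, pvPaint, h32, h48, if_true, if_false,
      List.flatMap_cons, List.flatMap_nil, List.map_cons, List.map_nil,
      List.append_nil, List.nil_append, List.cons_append, List.append_assoc,
      List.reverse_cons, List.reverse_nil,
      List.foldl_cons, List.foldl_nil, List.foldl_append]

def pvChainEval (x y : Int) (d : Int × Int × Int × Int) :
    List (List PvShape × (Int × Int × Int × Int)) → Int × Int × Int × Int
  | [] => d
  | (l, c) :: gs => if l.any (fun s => pvCoverS s x y) then c else pvChainEval x y d gs

theorem pvChain_eq (x y : Int) (d : Int × Int × Int × Int)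
    (gs : List (List PvShape × (Int × Int × Int × Int))) :
    (((gs.flatMap (fun g => g.1.map (fun s => (s, g.2)))).find?
        (fun p => pvCoverS p.1 x y)).map Prod.snd).getD d = pvChainEval x y d gs := by
  induction gs with
  | nil => rfl
  | cons g gs ih =>
    obtain ⟨l, c⟩ := g
    rw [List.flatMap_cons, List.find?_append]
    cases hf : (l.map (fun s => (s, c))).find? (fun p => pvCoverS p.1 x y) with
    | some p =>
      have hps := List.find?_some hf
      have hmem := List.mem_of_find?_eq_some hf
      obtain ⟨s, hs, rfl⟩ := List.mem_map.mp hmem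
      have hany : l.any (fun s => pvCoverS s x y) = true :=
        List.any_eq_true.mpr ⟨s, hs, hps⟩
      simp [pvChainEval, hany]
    | none =>
      have hnone := List.find?_eq_none.mp hf
      have hany : l.any (fun s => pvCoverS s x y) = false := by
        rw [List.any_eq_false]
        intro s hs hc
        exact hnone (s, c) (List.mem_map.mpr ⟨s, hs, rfl⟩) hc
      simp only [Option.none_or, pvChainEval, hany, Bool.false_eq_true, if_false]
      exact ih

theorem pvColor_eq (S m rad rail_h lens_cx lens_cy r_out r_body r_ring r_core
    hl_cx hl_cy hl_r sh_x sh_y sh_w sh_h sh_r vf_x vf_y vf_w vf_h vf_r x y : Int) :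
    ((((pvGroupsGen S m rad rail_h lens_cx lens_cy r_out r_body r_ring r_core
          hl_cx hl_cy hl_r sh_x sh_y sh_w sh_h sh_r vf_x vf_y vf_w vf_h vf_r).flatMap
        (fun g => g.1.map (fun s => (s, g.2)))).find?
        (fun p => pvCoverS p.1 x y)).map Prod.snd).getD (0, 0, 0, 0)
    = pvColorGen S m rad rail_h lens_cx lens_cy r_out r_body r_ring r_core
        hl_cx hl_cy hl_r sh_x sh_y sh_w sh_h sh_r vf_x vf_y vf_w vf_h vf_r x y := by
  rw [pvChain_eq]
  by_cases h48 : S ≥ 48 <;> by_cases h32 : S ≥ 32 <;>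
    simp only [pvGroupsGen, pvColorGen, pvButtonCov, pvCoverS, pvChainEval,
      h48, h32, if_true, if_false, true_and, false_and,
      List.append_nil, List.nil_append, List.cons_append,
      List.any_cons, List.any_nil, Bool.or_false, Bool.or_assoc]

theorem draw_camera_eq (S : Int) : draw_camera S = draw_camera_alt S := by
  rw [draw_camera_eq_paint]
  have hsq : pvSq S ((((pvGroups S).flatMap (fun g => g.1.map (fun s => (s, g.2)))).reverse).foldl
      (pvPaint S) (pvInit S)) :=
    pvFoldl_sq _ _ (fun g p hg => pvPaint_sq hg p) _ (pvInit_sq S)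
  have hlenR : (draw_camera_alt S).length = S.toNat := by
    simp [draw_camera_alt, PySem.List.length_pyRange_one]
  apply List.ext_getElem (by rw [hsq.1, hlenR])
  intro i hi hi'
  have hSpos : 0 < S := by
    rw [hsq.1] at hi; omega
  have hiS : i < S.toNat := by rw [hsq.1] at hi; exact hi
  apply List.ext_getElem
  · rw [hsq.2 _ (List.getElem_mem _)]
    simp only [draw_camera_alt]
    rw [List.getElem_map, List.length_map, PySem.List.length_pyRange_one]
    omega
  intro j hj hj'
  have hjS : j < S.toNat := by
    rw [hsq.2 _ (List.getElem_mem _)] at hj; exact hj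
  have hpix := pvPaintList_pix (S := S)
    (((pvGroups S).flatMap (fun g => g.1.map (fun s => (s, g.2)))).reverse)
    (x' := (j : Int)) (y' := (i : Int))
    (by omega) (by omega) (by omega) (by omega)
    (pvGroups_ok S) (pvInit S) (pvInit_sq S)
  have hL : (((((pvGroups S).flatMap (fun g => g.1.map (fun s => (s, g.2)))).reverse).foldl
      (pvPaint S) (pvInit S)))[i][j] =
      pvPix (((((pvGroups S).flatMap (fun g => g.1.map (fun s => (s, g.2)))).reverse).foldl
      (pvPaint S) (pvInit S))) (i : Int) (j : Int) := by
    unfold pvPix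
    rw [Int.toNat_natCast, Int.toNat_natCast, List.getD_eq_getElem?_getD,
      List.getD_eq_getElem?_getD, List.getElem?_eq_getElem hi, Option.getD_some,
      List.getElem?_eq_getElem hj, Option.getD_some]
  rw [hL, hpix.2, pvInit_pix, List.reverse_reverse]
  simp only [pvGroups]
  rw [pvColor_eq]
  simp only [draw_camera_alt]
  simp only [List.getElem_map, PySem.List.getElem_pyRange_one, zero_add]
  simp only [pvM, pvRadP, pvRailH, pvLensCx, pvLensCy, pvROut, pvRBody, pvRRing, pvRCore,
    pvHlR, pvHlCx, pvHlCy, pvShW, pvShH, pvShX, pvShY, pvShR, pvVfW, pvVfH, pvVfX, pvVfY, pvVfR]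

-- ===== VERDICT (by name: the statement is the Claim_ definition above) =====
theorem draw_camera_spec : Claim_equal_draw_camera := by
  intro S _
  exact draw_camera_eq S
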